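-- pv_equiv track=rewrite | github.com/vdinesh18/mcpserver-distributable | test.py | sort_alphabets
-- ===== SOURCE A (Python) =====
-- def sort_alphabets(s: str) -> str:
--     """
--     Return all alphabetic characters from s, lowercased and arranged in sorted order.
--     Uses counting sort over 26 letters for O(n) performance.
--     """
--     counts = [0] * 26
--     base = ord('a')
--     for ch in s:
--         if ch.isalpha():
--             idx = ord(ch.lower()) - base
--             if 0 <= idx < 26:
--                 counts[idx] += 1
--     parts = []
--     for i, cnt in enumerate(counts):
--         if cnt:
--             parts.append(chr(base + i) * cnt)
--     return ''.join(parts)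
-- ===== SOURCE B (Python) =====
-- def sort_alphabets(s: str) -> str:
--     return "".join(sorted(ch.lower() for ch in s if ch.isalpha()))
-- ===== Notes on version B (the rewrite author's own statement) =====
-- stated objective: simpler
-- what changed: Replaces the 26-bucket counting-sort table and its count-expansion loop with a one-liner: collect the lowercased alphabetic characters and comparison-sort them with sorted().
import Mathlib
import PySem

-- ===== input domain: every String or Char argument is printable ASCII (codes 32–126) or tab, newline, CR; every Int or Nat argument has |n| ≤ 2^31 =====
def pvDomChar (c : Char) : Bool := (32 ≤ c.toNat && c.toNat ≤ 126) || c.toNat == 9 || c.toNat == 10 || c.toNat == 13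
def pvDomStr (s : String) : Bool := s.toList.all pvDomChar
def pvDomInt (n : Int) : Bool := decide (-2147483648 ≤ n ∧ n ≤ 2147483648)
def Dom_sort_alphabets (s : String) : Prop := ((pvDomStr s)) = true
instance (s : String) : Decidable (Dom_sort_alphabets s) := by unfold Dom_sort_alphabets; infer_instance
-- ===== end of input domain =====

-- B replaces A's 26-bucket counting sort (tally loop + expansion loop) with collecting the
-- lowercased alphabetic characters and comparison-sorting them; same result, simpler code.


-- ===== PORT A =====
-- one iteration of A's tally loop: 'if ch.isalpha(): idx = ord(ch.lower()) - 97; if 0 <= idx < 26: counts[idx] += 1'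
def pvStep (counts : List Int) (ch : Char) : List Int :=
  if PySem.Chars.isalpha ch then
    let idx : Int := ((PySem.Chars.lowerChar ch).toNat : Int) - 97
    if 0 ≤ idx ∧ idx < 26 then
      counts.set idx.toNat (counts.getD idx.toNat 0 + 1)
    else counts
  else counts

def sort_alphabets (s : String) : String :=
  let counts : List Int := s.toList.foldl pvStep (List.replicate 26 (0 : Int))
  let parts : List (List Char) :=
    (PySem.List.enumerate counts).foldl
      (fun parts ic =>
        if ic.2 ≠ 0 then parts ++ [List.replicate ic.2.toNat (Char.ofNat (97 + ic.1).toNat)]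
        else parts) []
  String.mk parts.flatten   -- ''.join(parts): exact, the separator is empty

-- ===== PORT B =====
def sort_alphabets_alt (s : String) : String :=
  String.mk (PySem.List.sorted ((s.toList.filter PySem.Chars.isalpha).map PySem.Chars.lowerChar) (fun c => c))

-- ===== PRECONDITION & SPEC =====
def Spec_sort_alphabets (s : String) (out : String) : Prop := out = sort_alphabets_alt s
instance (s : String) (out : String) : Decidable (Spec_sort_alphabets s out) := by unfold Spec_sort_alphabets; infer_instance

-- ===== CLAIM (what is proved, stated in full; the proofs are below) =====
def Claim_equal_sort_alphabets : Prop := ∀ (s : String), Dom_sort_alphabets s → Spec_sort_alphabets s (sort_alphabets s)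

-- ===== LEMMAS AND PROOFS =====

-- the i-th lowercase letter 'a'..'z'
def pvChr (i : Nat) : Char := Char.ofNat (97 + i)

-- the predicate A's bucket i counts
def pvP (i : Nat) (c : Char) : Bool :=
  PySem.Chars.isalpha c && (PySem.Chars.lowerChar c == pvChr i)

lemma pvChr_toNat (i : Nat) (hi : i < 26) : (pvChr i).toNat = 97 + i := by
  unfold pvChr
  rw [Char.toNat_ofNat, if_pos (Or.inl (by omega))]

lemma alpha_bounds (c : Char) (h : PySem.Chars.isalpha c = true) :
    (65 ≤ c.toNat ∧ c.toNat ≤ 90) ∨ (97 ≤ c.toNat ∧ c.toNat ≤ 122) := by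
  simp only [PySem.Chars.isalpha, PySem.Chars.isupper, PySem.Chars.islower, Bool.or_eq_true,
    Bool.and_eq_true, decide_eq_true_eq, Char.le_def, UInt32.le_iff_toNat_le] at h
  exact h

lemma isupper_iff (c : Char) : PySem.Chars.isupper c = true ↔ 65 ≤ c.toNat ∧ c.toNat ≤ 90 := by
  simp only [PySem.Chars.isupper, Bool.and_eq_true, decide_eq_true_eq, Char.le_def,
    UInt32.le_iff_toNat_le]
  exact Iff.rfl

lemma alpha_lower (c : Char) (h : PySem.Chars.isalpha c = true) :
    97 ≤ (PySem.Chars.lowerChar c).toNat ∧ (PySem.Chars.lowerChar c).toNat ≤ 122 := by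
  unfold PySem.Chars.lowerChar
  rcases alpha_bounds c h with ⟨h1, h2⟩ | ⟨h1, h2⟩
  · rw [if_pos ((isupper_iff c).2 ⟨h1, h2⟩)]
    rw [Char.toNat_ofNat, if_pos (Or.inl (by omega))]
    omega
  · by_cases hu : PySem.Chars.isupper c = true
    · rw [isupper_iff] at hu; omega
    · rw [if_neg hu]; omega

lemma pvP_iff (i : Nat) (hi : i < 26) (c : Char) (ha : PySem.Chars.isalpha c = true) :
    pvP i c = true ↔ (PySem.Chars.lowerChar c).toNat = 97 + i := by
  unfold pvP
  rw [ha, Bool.true_and, beq_iff_eq]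
  constructor
  · intro h; rw [h, pvChr_toNat i hi]
  · intro h
    unfold pvChr
    rw [← h, Char.ofNat_toNat]

lemma pvP_false_of_not_alpha (i : Nat) (c : Char) (ha : PySem.Chars.isalpha c = false) :
    pvP i c = false := by
  unfold pvP; rw [ha]; rfl

lemma getD_set (v : List Int) (j i : Nat) (x : Int) (hj : j < v.length) :
    (v.set j x).getD i 0 = if i = j then x else v.getD i 0 := by
  simp only [List.getD, List.getElem?_set]
  by_cases hij : i = j
  · subst hij; simp [hj]
  · rw [if_neg (fun hh => hij hh.symm), if_neg hij]

-- one iteration of A's tally loop bumps exactly the bucket of this character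
lemma pvStep_getD (v : List Int) (hv : v.length = 26) (c : Char) :
    (pvStep v c).length = 26 ∧
    ∀ i, i < 26 → (pvStep v c).getD i 0 = v.getD i 0 + (if pvP i c then 1 else 0) := by
  by_cases ha : PySem.Chars.isalpha c = true
  · have hb := alpha_lower c ha
    unfold pvStep
    rw [if_pos ha]
    have hidx : (0 : Int) ≤ ((PySem.Chars.lowerChar c).toNat : Int) - 97 ∧
        ((PySem.Chars.lowerChar c).toNat : Int) - 97 < 26 := by
      constructor
      · omega
      · omega
    rw [if_pos hidx]
    have hj : (((PySem.Chars.lowerChar c).toNat : Int) - 97).toNat =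
        (PySem.Chars.lowerChar c).toNat - 97 := by omega
    refine ⟨by simp [hv], ?_⟩
    intro i hi
    rw [hj, getD_set _ _ _ _ (by omega)]
    by_cases hik : i = (PySem.Chars.lowerChar c).toNat - 97
    · rw [if_pos hik]
      have hp : pvP i c = true := (pvP_iff i hi c ha).2 (by omega)
      rw [hp, if_pos rfl, hik]
    · rw [if_neg hik]
      have hp : pvP i c ≠ true := by
        intro h
        exact hik (by have := (pvP_iff i hi c ha).1 h; omega)
      simp [hp]
  · have ha' : PySem.Chars.isalpha c = false := by simpa using ha
    unfold pvStep
    rw [if_neg (by simp [ha'])]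
    exact ⟨hv, fun i _ => by rw [pvP_false_of_not_alpha i c ha']; simp⟩

-- A's tally loop computes the 26 per-letter counts
lemma counts_fold (l : List Char) : ∀ (v : List Int), v.length = 26 →
    (l.foldl pvStep v).length = 26 ∧
    ∀ i, i < 26 → (l.foldl pvStep v).getD i 0 = v.getD i 0 + (l.countP (pvP i) : Int) := by
  induction l with
  | nil => intro v hv; exact ⟨hv, fun i _ => by simp⟩
  | cons c t ih =>
    intro v hv
    have hs := pvStep_getD v hv c
    have ht := ih (pvStep v c) hs.1
    refine ⟨ht.1, fun i hi => ?_⟩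
    rw [List.foldl_cons, ht.2 i hi, hs.2 i hi, List.countP_cons]
    push_cast
    by_cases hp : pvP i c = true <;> simp [hp] <;> ring

lemma counts_eq (l : List Char) :
    l.foldl pvStep (List.replicate 26 (0 : Int)) =
      (List.range 26).map (fun i => ((l.countP (pvP i) : Nat) : Int)) := by
  have h := counts_fold l (List.replicate 26 0) (by simp)
  apply List.ext_getElem (by simp only [List.length_map, List.length_range]; exact h.1)
  intro i h1 h2
  have hi : i < 26 := by rw [h.1] at h1; exact h1
  have hD := h.2 i hi
  rw [List.getD_eq_getElem _ _ h1] at hD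
  have hz : (List.replicate 26 (0 : Int)).getD i 0 = 0 := by
    rw [List.getD_eq_getElem _ _ (by simp [hi]), List.getElem_replicate]
  rw [hD, hz, zero_add]
  simp

lemma enum_map_range (n : Nat) (g : Nat → Int) :
    PySem.List.enumerate ((List.range n).map g) 0 = (List.range n).map (fun i => (((i : Nat) : Int), g i)) := by
  apply List.ext_getElem (by simp [PySem.List.length_enumerate])
  intro k h1 h2
  have hk : k < n := by simpa using h2
  rw [PySem.List.getElem_enumerate]
  simp

lemma flatten_filter_map {α β : Type} (p : α → Bool) (f : α → List β) (L : List α)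
    (h : ∀ x ∈ L, p x = false → f x = []) :
    ((L.filter p).map f).flatten = (L.map f).flatten := by
  induction L with
  | nil => rfl
  | cons x t ih =>
    have ih' := ih (fun y hy => h y (List.mem_cons_of_mem x hy))
    by_cases hp : p x = true
    · simp [hp, ih']
    · have hp' : p x = false := by simpa using hp
      simp [hp', ih', h x (List.mem_cons_self) hp']

lemma sum_map_range_single (n : Nat) : ∀ (k : Nat), k < n → ∀ (g : Nat → Nat),
    (∀ i, i < n → i ≠ k → g i = 0) → ((List.range n).map g).sum = g k := by
  induction n with
  | zero => intro k hk; omega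
  | succ n ih =>
    intro k hk g h
    rw [List.range_succ, List.map_append, List.sum_append]
    by_cases hkn : k = n
    · have h0 : ((List.range n).map g).sum = 0 := by
        apply List.sum_eq_zero
        intro x hx
        obtain ⟨i, hi, rfl⟩ := List.mem_map.1 hx
        exact h i (by simpa using (List.mem_range.1 hi).trans (Nat.lt_succ_self n)) (by have := List.mem_range.1 hi; omega)
      simp [h0, hkn]
    · rw [ih k (by omega) g (fun i hi hik => h i (by omega) hik)]
      have : g n = 0 := h n (by omega) (fun hh => hkn hh.symm)
      simp [this]

-- the expansion of A's counts, as one list expression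
def pvExpand (l : List Char) : List (List Char) :=
  (List.range 26).map (fun i => List.replicate (l.countP (pvP i)) (pvChr i))

lemma out_eq (l : List Char) :
    ((PySem.List.enumerate (l.foldl pvStep (List.replicate 26 (0:Int)))).foldl
      (fun parts ic =>
        if ic.2 ≠ 0 then parts ++ [List.replicate ic.2.toNat (Char.ofNat (97 + ic.1).toNat)]
        else parts) []).flatten = (pvExpand l).flatten := by
  rw [counts_eq, enum_map_range,
    PySem.List.foldl_append_ite (p := fun ic : Int × Int => ic.2 ≠ 0)
      (f := fun ic : Int × Int => List.replicate ic.2.toNat (Char.ofNat (97 + ic.1).toNat))]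
  rw [List.nil_append,
    flatten_filter_map _ _ _ (by
      intro x hx hx0
      simp only [decide_eq_false_iff_not, not_not] at hx0
      rw [hx0]
      norm_num),
    List.map_map]
  unfold pvExpand
  refine congrArg List.flatten ?_
  apply List.map_congr_left
  intro i hi
  simp only [Function.comp_apply]
  have h1 : (((l.countP (pvP i) : Nat) : Int)).toNat = l.countP (pvP i) := by omega
  have h2 : ((97 : Int) + (i : Nat)).toNat = 97 + i := by omega
  rw [h1, h2]
  rfl

lemma expand_perm (l : List Char) :
    (pvExpand l).flatten.Perm ((l.filter PySem.Chars.isalpha).map PySem.Chars.lowerChar) := by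
  rw [List.perm_iff_count]
  intro a
  rw [List.count_flatten]
  unfold pvExpand
  rw [List.map_map]
  have hterm : ∀ i, i < 26 →
      (List.count a ∘ fun i => List.replicate (l.countP (pvP i)) (pvChr i)) i =
        if (pvChr i == a) = true then l.countP (pvP i) else 0 := by
    intro i _; simp [List.count_replicate]
  have hrhs : List.count a ((l.filter PySem.Chars.isalpha).map PySem.Chars.lowerChar) =
      l.countP (fun c => PySem.Chars.isalpha c && (PySem.Chars.lowerChar c == a)) := by
    rw [List.count_eq_countP, List.countP_map, List.countP_filter]
    apply List.countP_congr
    intro c _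
    simp [Function.comp, Bool.and_comm]
  rw [hrhs]
  by_cases hA : 97 ≤ a.toNat ∧ a.toNat ≤ 122
  · set k := a.toNat - 97 with hk
    have hk26 : k < 26 := by omega
    have hak : a = pvChr k := by
      unfold pvChr
      rw [show 97 + k = a.toNat by omega, Char.ofNat_toNat]
    rw [List.map_congr_left (fun i hmem => hterm i (List.mem_range.1 hmem))]
    rw [sum_map_range_single 26 k hk26 _ (by
      intro i hi hik
      rw [if_neg]
      simp only [beq_iff_eq]
      intro hc
      have hcc : (pvChr i).toNat = a.toNat := by rw [hc]
      rw [pvChr_toNat i hi] at hcc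
      omega)]
    rw [if_pos (by rw [hak]; simp)]
    apply List.countP_congr
    intro c _
    unfold pvP
    rw [hak]
  · rw [List.map_congr_left (fun i hmem => hterm i (List.mem_range.1 hmem))]
    have h0 : ((List.range 26).map fun i => if (pvChr i == a) = true then l.countP (pvP i) else 0).sum = 0 := by
      apply List.sum_eq_zero
      intro x hx
      obtain ⟨i, hi, rfl⟩ := List.mem_map.1 hx
      rw [if_neg]
      simp only [beq_iff_eq]
      intro hc
      have hi' := List.mem_range.1 hi
      have hcn := pvChr_toNat i hi'
      rw [hc] at hcn
      exact hA ⟨by omega, by omega⟩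
    rw [h0]
    symm
    apply List.countP_eq_zero.2
    intro c _ hc
    simp only [Bool.and_eq_true, beq_iff_eq] at hc
    have hb := alpha_lower c hc.1
    rw [hc.2] at hb
    exact hA hb

lemma expand_pairwise (l : List Char) :
    (pvExpand l).flatten.Pairwise (· ≤ ·) := by
  rw [List.pairwise_flatten]
  constructor
  · intro t ht
    obtain ⟨i, _, rfl⟩ := List.mem_map.1 ht
    exact List.pairwise_replicate.2 (Or.inr le_rfl)
  · unfold pvExpand
    rw [List.pairwise_map]
    refine List.Pairwise.imp_of_mem ?_ List.pairwise_lt_range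
    intro i j hi hj hij x hx y hy
    rw [List.eq_of_mem_replicate hx, List.eq_of_mem_replicate hy]
    rw [Char.le_def, UInt32.le_iff_toNat_le]
    have h1 := pvChr_toNat i (List.mem_range.1 hi)
    have h2 := pvChr_toNat j (List.mem_range.1 hj)
    show (pvChr i).toNat ≤ (pvChr j).toNat
    omega

-- ===== VERDICT (by name: the statement is the Claim_ definition above) =====
theorem sort_alphabets_spec : Claim_equal_sort_alphabets := by
  intro s _
  unfold Spec_sort_alphabets sort_alphabets sort_alphabets_alt
  refine congrArg String.mk ?_
  rw [out_eq s.toList]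
  exact (PySem.List.sorted_id_eq_of_perm_of_pairwise _ _ (expand_perm s.toList) (expand_pairwise s.toList)).symm
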